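-- pv_equiv track=rewrite | github.com/YisakH/Ps | 프로그래머스/2/132265. 롤케이크 자르기/롤케이크 자르기.py | solution
-- ===== SOURCE A (Python) =====
-- from collections import Counter
--
-- def solution(topping):
--     answer = 0
--     remain = Counter(topping)
--     left_set = set()
--     right_set = set(remain)
--
--     for to in topping:
--         if to not in left_set:
--             left_set.add(to)
--
--         remain[to] -= 1
--         if remain[to] == 0:
--             right_set.remove(to)
--
--         if len(left_set) == len(right_set):
--             answer += 1
--
--     return answer
-- ===== SOURCE B (Python) =====
-- def solution(topping):
--     # Stage 1: suffix table — right_count[i] = number of distinct toppings in topping[i:].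
--     right_count = [0]
--     seen = set()
--     for t in reversed(topping):
--         seen.add(t)
--         right_count.append(len(seen))
--     right_count.reverse()
--     # Stage 2: forward sweep of the left half against the precomputed table.
--     answer = 0
--     left = set()
--     for t, r in zip(topping, right_count[1:]):
--         left.add(t)
--         if len(left) == r:
--             answer += 1
--     return answer
-- ===== Notes on version B (the rewrite author's own statement) =====
-- stated objective: alternative
-- what changed: Replaces the single simultaneous sweep that maintains a Counter of remaining occurrences plus a shrinking right set with a two-stage method: a backward pass precomputes a suffix table of distinct-topping counts, then a forward pass grows only the left set and compares against the table.
import Mathlib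
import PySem

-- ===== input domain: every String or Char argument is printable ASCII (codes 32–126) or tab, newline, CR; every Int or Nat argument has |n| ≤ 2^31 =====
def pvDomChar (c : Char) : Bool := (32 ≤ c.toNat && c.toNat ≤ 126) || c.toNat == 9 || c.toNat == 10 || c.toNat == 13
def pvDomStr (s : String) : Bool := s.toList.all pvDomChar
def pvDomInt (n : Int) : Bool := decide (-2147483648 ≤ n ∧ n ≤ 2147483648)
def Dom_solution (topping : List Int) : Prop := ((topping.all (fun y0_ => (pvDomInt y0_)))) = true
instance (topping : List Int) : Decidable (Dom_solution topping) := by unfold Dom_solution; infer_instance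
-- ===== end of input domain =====

-- B replaces A's simultaneous Counter-and-two-sets sweep by a precomputed suffix table of
-- distinct counts followed by a forward sweep over the left set (alternative decomposition).

-- ===== PORT A =====
def solution (topping : List Int) : Int :=
  let remain := PySem.Dict.counter topping
  let st := topping.foldl
    (fun (st : Int × PySem.Dict Int Int × PySem.Set Int × PySem.Set Int) tp =>
      let answer := st.1
      let remain := st.2.1
      let left_set := st.2.2.1
      let right_set := st.2.2.2
      let left_set := if PySem.Set.contains left_set tp then left_set else PySem.Set.add left_set tp
      let remain := remain.modify tp 0 (· - 1)
      -- right_set.remove(tp): Python raises KeyError only on an absent key, which never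
      -- happens here (removal fires exactly at the last remaining occurrence of tp).
      let right_set := if remain.getD tp 0 == 0 then PySem.Set.discard right_set tp else right_set
      let answer := if PySem.Set.len left_set == PySem.Set.len right_set then answer + 1 else answer
      (answer, remain, left_set, right_set))
    ((0 : Int), remain, PySem.Set.empty, PySem.Set.ofList remain.keys)
  st.1

-- ===== PORT B =====
-- backward pass: rcAux xs = (set of distinct toppings of xs, the suffix-count table for xs)
def rcAux : List Int → PySem.Set Int × List Int
  | [] => (PySem.Set.empty, [(0 : Int)])
  | t :: rest =>
    let p := rcAux rest
    let seen := PySem.Set.add p.1 t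
    (seen, (PySem.Set.len seen : Int) :: p.2)

def solution_alt (topping : List Int) : Int :=
  let right_count := (rcAux topping).2
  (List.foldl
    (fun (st : Int × PySem.Set Int) (p : Int × Int) =>
      let left := PySem.Set.add st.2 p.1
      (if (PySem.Set.len left : Int) == p.2 then st.1 + 1 else st.1, left))
    ((0 : Int), PySem.Set.empty)
    (topping.zip (PySem.List.slice right_count (some 1) none))).1

-- ===== PRECONDITION & SPEC =====
def Spec_solution (topping : List Int) (out : Int) : Prop := out = solution_alt topping
instance (topping : List Int) (out : Int) : Decidable (Spec_solution topping out) := by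
  unfold Spec_solution; infer_instance

-- ===== CLAIM (what is proved, stated in full; the proofs are below) =====
def Claim_equal_solution : Prop := ∀ (topping : List Int), Dom_solution topping → Spec_solution topping (solution topping)

-- ===== LEMMAS AND PROOFS =====

-- number of distinct elements of xs
def dset (xs : List Int) : Nat := (PySem.Set.ofList xs).length

-- shared reference count: walks the list once, growing the left set, counting positions
-- where the left set's size equals the distinct count of the remaining suffix
def cnt : PySem.Set Int → List Int → Int
  | _, [] => 0
  | ls, t :: rest =>
    (if (PySem.Set.add ls t).length = dset rest then 1 else 0) + cnt (PySem.Set.add ls t) rest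

-- reference suffix table
def specRC : List Int → List Int
  | [] => [(0 : Int)]
  | t :: rest => ((dset (t :: rest) : Nat) : Int) :: specRC rest

lemma len_eq_dset (s : PySem.Set Int) (xs : List Int) (hn : s.Nodup)
    (hm : ∀ y, y ∈ s ↔ y ∈ xs) : s.length = dset xs := by
  have hp : s.Perm (PySem.Set.ofList xs) := by
    refine (List.perm_ext_iff_of_nodup hn (PySem.Set.nodup_ofList xs)).2 ?_
    intro y
    rw [hm y, PySem.Set.mem_ofList]
  exact hp.length_eq

lemma rcAux_spec (xs : List Int) :
    (rcAux xs).1.Nodup ∧ (∀ y, y ∈ (rcAux xs).1 ↔ y ∈ xs) ∧ (rcAux xs).2 = specRC xs := by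
  induction xs with
  | nil => exact ⟨List.nodup_nil, fun y => by simp [rcAux, PySem.Set.empty], rfl⟩
  | cons t rest ih =>
    obtain ⟨hn, hm, hrc⟩ := ih
    have hn' : (PySem.Set.add (rcAux rest).1 t).Nodup := PySem.Set.nodup_add _ _ hn
    have hm' : ∀ y, y ∈ PySem.Set.add (rcAux rest).1 t ↔ y ∈ t :: rest := by
      intro y
      rw [PySem.Set.mem_add, hm y]
      simp [or_comm]
    refine ⟨hn', hm', ?_⟩
    show ((PySem.Set.add (rcAux rest).1 t).length : Int) :: (rcAux rest).2 = _
    rw [hrc, specRC, len_eq_dset _ _ hn' hm']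

lemma specRC_head (xs : List Int) : specRC xs = ((dset xs : Nat) : Int) :: (specRC xs).drop 1 := by
  cases xs <;> simp [specRC, dset, PySem.Set.ofList_nil]

lemma B_loop (xs : List Int) : ∀ (a : Int) (ls : PySem.Set Int),
    (List.foldl
      (fun (st : Int × PySem.Set Int) (p : Int × Int) =>
        let left := PySem.Set.add st.2 p.1
        (if (PySem.Set.len left : Int) == p.2 then st.1 + 1 else st.1, left))
      (a, ls) (xs.zip ((specRC xs).drop 1))).1 = a + cnt ls xs := by
  induction xs with
  | nil => intro a ls; simp [cnt]
  | cons t rest ih =>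
    intro a ls
    have hz : (t :: rest).zip ((specRC (t :: rest)).drop 1)
        = (t, ((dset rest : Nat) : Int)) :: rest.zip ((specRC rest).drop 1) := by
      show (t :: rest).zip (specRC rest) = _
      rw [specRC_head rest]
      rfl
    rw [hz]
    simp only [List.foldl_cons, cnt, ih]
    have hcond : ((PySem.Set.len (PySem.Set.add ls t) : Int) == ((dset rest : Nat) : Int))
        = decide ((PySem.Set.add ls t).length = dset rest) := by
      rw [Bool.eq_iff_iff]
      simp [PySem.Set.len]
    rw [hcond]
    by_cases h : (PySem.Set.add ls t).length = dset rest <;> simp [h] <;> ring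

lemma A_loop (rest : List Int) : ∀ (a : Int) (remain : PySem.Dict Int Int)
    (ls rs : PySem.Set Int),
    (∀ x, remain.getD x 0 = (rest.count x : Int)) →
    rs.Nodup → (∀ y, y ∈ rs ↔ y ∈ rest) →
    (List.foldl
      (fun (st : Int × PySem.Dict Int Int × PySem.Set Int × PySem.Set Int) tp =>
        let answer := st.1
        let remain := st.2.1
        let left_set := st.2.2.1
        let right_set := st.2.2.2
        let left_set := if PySem.Set.contains left_set tp then left_set else PySem.Set.add left_set tp
        let remain := remain.modify tp 0 (· - 1)
        let right_set := if remain.getD tp 0 == 0 then PySem.Set.discard right_set tp else right_set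
        let answer := if PySem.Set.len left_set == PySem.Set.len right_set then answer + 1 else answer
        (answer, remain, left_set, right_set))
      (a, remain, ls, rs) rest).1 = a + cnt ls rest := by
  induction rest with
  | nil => intro a remain ls rs _ _ _; simp [cnt]
  | cons t r ih =>
    intro a remain ls rs hrem hnd hmem
    simp only [List.foldl_cons]
    -- the left-set update is Set.add
    have hls : (if PySem.Set.contains ls t then ls else PySem.Set.add ls t) = PySem.Set.add ls t := by
      by_cases h : PySem.Set.contains ls t <;> simp [h, PySem.Set.add]
    -- the decremented counter counts the tail
    have hrem' : ∀ x, (remain.modify t 0 (· - 1)).getD x 0 = (r.count x : Int) := by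
      intro x
      rw [PySem.Dict.getD_modify]
      by_cases hx : x = t
      · rw [if_pos hx, hx, hrem t, List.count_cons_self]
        push_cast
        ring
      · rw [if_neg hx, hrem x, List.count_cons]
        simp [Ne.symm hx]
    -- the updated right set is exactly the distinct elements of the tail
    set rs' := (if (remain.modify t 0 (· - 1)).getD t 0 == 0 then PySem.Set.discard rs t else rs) with hrs'
    have hcond0 : ((remain.modify t 0 (· - 1)).getD t 0 == 0) = decide (t ∉ r) := by
      rw [hrem' t]
      by_cases h : t ∈ r
      · have : r.count t ≠ 0 := by simpa [List.count_eq_zero] using h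
        simp [h, this]
      · simp [h, List.count_eq_zero.2 h]
    have hnd2 : rs'.Nodup := by
      rw [hrs']; split
      · exact PySem.Set.nodup_discard _ _ hnd
      · exact hnd
    have hmem2 : ∀ y, y ∈ rs' ↔ y ∈ r := by
      intro y
      rw [hrs', hcond0]
      by_cases h : t ∈ r
      · simp only [h, not_true_eq_false, decide_false, Bool.false_eq_true, if_false]
        rw [hmem y, List.mem_cons]
        exact ⟨fun hy => hy.elim (fun e => e ▸ h) id, Or.inr⟩
      · simp only [h, not_false_eq_true, decide_true, if_true]
        rw [PySem.Set.mem_discard, hmem y, List.mem_cons]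
        constructor
        · rintro ⟨hy, hne⟩
          exact hy.elim (fun e => absurd e hne) id
        · intro hy
          exact ⟨Or.inr hy, fun he => h (he ▸ hy)⟩
    have hlen : rs'.length = dset r := len_eq_dset rs' r hnd2 hmem2
    have hIH := ih (if PySem.Set.len (PySem.Set.add ls t) == PySem.Set.len rs' then a + 1 else a)
      (remain.modify t 0 (· - 1)) (PySem.Set.add ls t) rs' hrem' hnd2 hmem2
    rw [hls]
    rw [hIH, cnt]
    have : (PySem.Set.len (PySem.Set.add ls t) == PySem.Set.len rs')
        = decide ((PySem.Set.add ls t).length = dset r) := by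
      rw [Bool.eq_iff_iff]
      simp [PySem.Set.len, hlen]
    rw [this]
    by_cases h : (PySem.Set.add ls t).length = dset r <;> simp [h] <;> ring

-- ===== VERDICT (by name: the statement is the Claim_ definition above) =====
theorem solution_spec : Claim_equal_solution := by
  intro topping _
  unfold Spec_solution solution solution_alt
  simp only []
  -- A side
  have hA := A_loop topping 0 (PySem.Dict.counter topping) PySem.Set.empty
    (PySem.Set.ofList (PySem.Dict.counter topping).keys)
    (fun x => PySem.Dict.getD_counter topping x)
    (by rw [PySem.Dict.keys_counter, PySem.Set.ofList_ofList]; exact PySem.Set.nodup_ofList _)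
    (by intro y; rw [PySem.Dict.keys_counter, PySem.Set.ofList_ofList, PySem.Set.mem_ofList])
  -- B side
  obtain ⟨_, _, hrc⟩ := rcAux_spec topping
  have hslice : PySem.List.slice (rcAux topping).2 (some 1) none = ((rcAux topping).2).drop 1 := by
    have := PySem.List.slice_from ((rcAux topping).2) (a := 1) (by norm_num)
    simpa using this
  rw [hA, hslice, hrc, B_loop topping 0 PySem.Set.empty]
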